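-- pv_equiv track=rewrite | github.com/KimGaeun309/-TIL | Prepare_Coding_Test/Coding_Test/21_1/조이스틱.py | solution
-- ===== SOURCE A (Python) =====
-- def solution(name):
--     answer = 0
--     #위아래로 움직이는 횟수
--     for i in range(len(name)):
--         a = ord('Z') - ord(name[i]) + 1
--         b = ord(name[i]) - ord('A')
--         answer += min(a,b)
--
--     #왼쪽 오른쪽으로 움직이는 횟수
--     l = len(name)
--     move = l - 1 #첫 글자부터 오른쪽으로 끝까지 갈 때
--
--     for i in range(l):
--         n_i = i + 1 #첫 글자는 A이든 아니든 기본적으로 찍힌다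
--         while n_i < l and name[n_i] == 'A': #A가 몇 개?
--             n_i += 1
--         move = min(move, i + l - n_i + i)
--
--     answer += move
--
--     return answer
-- ===== SOURCE B (Python) =====
-- def solution(name):
--     l = len(name)
--     updown = sum(min(ord(c) - ord('A'), ord('Z') - ord(c) + 1) for c in name)
--     # nxt[j] = smallest index k >= j with name[k] != 'A', or l if none (one backward pass)
--     nxt = [l] * (l + 1)
--     for j in range(l - 1, -1, -1):
--         nxt[j] = j if name[j] != 'A' else nxt[j + 1]
--     move = l - 1
--     for i in range(l):
--         move = min(move, 2 * i + l - nxt[i + 1])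
--     return updown + move
-- ===== Notes on version B (the rewrite author's own statement) =====
-- stated objective: alternative
-- what changed: Replaced A's inner while-loop (re-scanning the run of 'A's after every start index, worst-case quadratic) with a next-non-'A' index array filled in one backward pass, then a single scan over the start indices.
import Mathlib
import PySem

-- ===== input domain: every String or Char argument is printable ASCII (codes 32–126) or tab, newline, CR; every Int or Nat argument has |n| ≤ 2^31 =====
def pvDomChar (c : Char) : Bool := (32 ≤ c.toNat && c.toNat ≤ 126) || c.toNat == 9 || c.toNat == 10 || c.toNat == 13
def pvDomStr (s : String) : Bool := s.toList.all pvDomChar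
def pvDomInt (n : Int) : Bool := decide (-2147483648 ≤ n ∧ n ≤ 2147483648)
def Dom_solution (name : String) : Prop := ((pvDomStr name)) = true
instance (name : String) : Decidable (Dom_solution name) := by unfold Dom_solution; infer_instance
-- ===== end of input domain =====

-- B replaces A's inner while-loop (re-scanning the run of 'A's after every start index)
-- by a next-non-'A' index array filled in one backward pass, then a single scan (alternative algorithm).

-- ===== PORT A =====
-- the inner `while n_i < l and name[n_i] == 'A': n_i += 1` loop of A
def skipA (s : List Char) (n : Int) : Int :=
  if h : n < (s.length : Int) then
    if PySem.List.pyGetD s n ' ' = 'A' then skipA s (n + 1) else n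
  else n
termination_by ((s.length : Int) - n).toNat
decreasing_by omega

def solution (name : String) : Int :=
  let s := name.toList
  let l := s.length
  let answer :=
    (PySem.List.pyRange 0 (l : Int)).foldl
      (fun acc i =>
        acc + min (90 - ((PySem.List.pyGetD s i ' ').toNat : Int) + 1)
                  (((PySem.List.pyGetD s i ' ').toNat : Int) - 65)) 0
  let move :=
    (PySem.List.pyRange 0 (l : Int)).foldl
      (fun move i => min move (i + (l : Int) - skipA s (i + 1) + i)) ((l : Int) - 1)
  answer + move

-- ===== PORT B =====
-- nxtList s p = the nxt array of Source B for the suffix s starting at absolute index p,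
-- filled back to front: entry j is the first index ≥ p+j holding a non-'A', else p+|s|.
def nxtList (s : List Char) (p : Int) : List Int :=
  match s with
  | [] => [p]
  | c :: rest =>
      let t := nxtList rest (p + 1)
      (if c ≠ 'A' then p else t.headD (p + 1)) :: t

def solution_alt (name : String) : Int :=
  let s := name.toList
  let l := s.length
  let updown := (s.map (fun c => min ((c.toNat : Int) - 65) (90 - (c.toNat : Int) + 1))).sum
  let nxt := nxtList s 0
  let move :=
    (PySem.List.pyRange 0 (l : Int)).foldl
      (fun m i => min m (2 * i + (l : Int) - PySem.List.pyGetD nxt (i + 1) 0)) ((l : Int) - 1)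
  updown + move

-- ===== PRECONDITION & SPEC =====
def Spec_solution (name : String) (out : Int) : Prop := out = solution_alt name
instance (name : String) (out : Int) : Decidable (Spec_solution name out) := by unfold Spec_solution; infer_instance

-- ===== CLAIM (what is proved, stated in full; the proofs are below) =====
def Claim_equal_solution : Prop := ∀ (name : String), Dom_solution name → Spec_solution name (solution name)

-- ===== LEMMAS AND PROOFS =====

-- skipA never moves past a position that is already out of range
theorem skipA_of_le (s : List Char) (n : Int) (h : (s.length : Int) ≤ n) : skipA s n = n := by
  rw [skipA]
  simp [not_lt.mpr h]

-- shifting skipA across a cons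
theorem skipA_cons (c : Char) : ∀ (f j : Nat) (rest : List Char), rest.length - j ≤ f →
    skipA (c :: rest) ((j : Int) + 1) = skipA rest (j : Int) + 1 := by
  intro f
  induction f with
  | zero =>
    intro j rest hf
    have hj : rest.length ≤ j := by omega
    rw [skipA_of_le rest _ (by exact_mod_cast hj),
        skipA_of_le (c :: rest) _ (by simp; omega)]
  | succ f ih =>
    intro j rest hf
    by_cases hj : j < rest.length
    · conv_lhs => rw [skipA]
      conv_rhs => rw [skipA]
      have h1 : (j : Int) + 1 < ((c :: rest).length : Int) := by simp; omega
      have h2 : (j : Int) < (rest.length : Int) := by exact_mod_cast hj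
      have hg : PySem.List.pyGetD (c :: rest) ((j : Int) + 1) ' '
          = PySem.List.pyGetD rest (j : Int) ' ' := by
        have : (j : Int) + 1 = ((j + 1 : Nat) : Int) := by push_cast; ring
        rw [this, PySem.List.pyGetD_natCast, PySem.List.pyGetD_natCast]
        simp [List.getD]
      rw [dif_pos h1, dif_pos h2, hg]
      by_cases hA : PySem.List.pyGetD rest (j : Int) ' ' = 'A'
      · rw [if_pos hA, if_pos hA]
        have : (j : Int) + 1 = ((j + 1 : Nat) : Int) := by push_cast; ring
        rw [this, ih (j + 1) rest (by omega)]
      · rw [if_neg hA, if_neg hA]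
    · have hj' : rest.length ≤ j := by omega
      rw [skipA_of_le rest _ (by exact_mod_cast hj'),
          skipA_of_le (c :: rest) _ (by simp; omega)]

-- the head of nxtList, with any default, is its entry 0
theorem nxtList_headD (t : List Char) (q d : Int) :
    (nxtList t q).headD d = (nxtList t q).getD 0 0 := by
  cases t <;> simp [nxtList]

-- entry j of the nxt array is p plus where A's while loop starting at j stops
theorem nxtList_getD : ∀ (s : List Char) (p : Int) (j : Nat), j ≤ s.length →
    (nxtList s p).getD j 0 = p + skipA s (j : Int) := by
  intro s
  induction s with
  | nil =>
    intro p j hj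
    have hj0 : j = 0 := by simpa using hj
    subst hj0
    have h0 : skipA [] (0 : Int) = 0 := skipA_of_le [] 0 (by simp)
    simp [nxtList, h0]
  | cons c rest ih =>
    intro p j hj
    cases j with
    | zero =>
      show (nxtList (c :: rest) p).getD 0 0 = p + skipA (c :: rest) 0
      have h0 : (0 : Int) < ((c :: rest).length : Int) := by simp
      by_cases hA : c = 'A'
      · have hL : (nxtList (c :: rest) p).getD 0 0 = (nxtList rest (p + 1)).getD 0 0 := by
          rw [nxtList, List.getD_cons_zero, if_neg (by simp [hA]), nxtList_headD]
        have hR : skipA (c :: rest) 0 = skipA rest ((0 : Nat) : Int) + 1 := by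
          rw [skipA, dif_pos h0, PySem.List.pyGetD_zero_cons, if_pos hA]
          have h01 : (0 : Int) + 1 = ((0 : Nat) : Int) + 1 := by norm_num
          rw [h01, skipA_cons c rest.length 0 rest (by omega)]
        rw [hL, hR, ih (p + 1) 0 (by omega)]
        ring
      · have hR : skipA (c :: rest) 0 = 0 := by
          rw [skipA, dif_pos h0, PySem.List.pyGetD_zero_cons, if_neg hA]
        simp [nxtList, hA, hR]
    | succ k =>
      show (nxtList (c :: rest) p).getD (k + 1) 0 = p + skipA (c :: rest) ((k + 1 : Nat) : Int)
      simp only [nxtList, List.getD_cons_succ]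
      rw [ih (p + 1) k (by simpa using hj)]
      have : ((k + 1 : Nat) : Int) = (k : Int) + 1 := by push_cast; ring
      rw [this, skipA_cons c rest.length k rest (by omega)]
      ring

-- the two up/down passes agree (fold over indices vs map-sum over characters)
theorem updown_eq (s : List Char) :
    (PySem.List.pyRange 0 (s.length : Int)).foldl
      (fun acc i =>
        acc + min (90 - ((PySem.List.pyGetD s i ' ').toNat : Int) + 1)
                  (((PySem.List.pyGetD s i ' ').toNat : Int) - 65)) 0
    = (s.map (fun c => min ((c.toNat : Int) - 65) (90 - (c.toNat : Int) + 1))).sum := by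
  rw [PySem.List.foldl_pyRange_zero_pyGetD' s ' '
      (fun acc c => acc + min (90 - (c.toNat : Int) + 1) ((c.toNat : Int) - 65)) 0]
  rw [PySem.List.foldl_add]
  simp [min_comm]

-- the two move passes agree
theorem move_eq (s : List Char) :
    (PySem.List.pyRange 0 (s.length : Int)).foldl
      (fun move i => min move (i + (s.length : Int) - skipA s (i + 1) + i)) ((s.length : Int) - 1)
    = (PySem.List.pyRange 0 (s.length : Int)).foldl
      (fun m i => min m (2 * i + (s.length : Int) - PySem.List.pyGetD (nxtList s 0) (i + 1) 0))
      ((s.length : Int) - 1) := by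
  apply PySem.List.foldl_congr_mem
  intro acc i hi
  rw [PySem.List.mem_pyRange_one] at hi
  have hcast : i + 1 = ((i.toNat + 1 : Nat) : Int) := by omega
  rw [hcast, PySem.List.pyGetD_natCast, nxtList_getD s 0 (i.toNat + 1) (by omega)]
  rw [← hcast]
  ring_nf

-- ===== VERDICT (by name: the statement is the Claim_ definition above) =====
theorem solution_spec : Claim_equal_solution := by
  intro name _
  unfold Spec_solution solution solution_alt
  simp only []
  rw [updown_eq, move_eq]
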